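/- GENERATED by farm/worked/mk_tree_copies.py from farm/worked/flush_packet/Proof.lean (a worked proof of the farm's unit `flush_packet`,
   accepted by the verdict) — do not edit. -/
/-
  `flush_packet` (CONTRACTS 61; stb_vorbis_fixed.c:1620): `while (get8_packet_raw(f) != EOP);` — THE TEMPLATE OF A μ-LOOP.

      110a60 push rbx ; 110a61 mov rbx, rdi
      110a64 L: mov rdi, rbx ; 110a67 call get8_packet_raw ; 110a6c cmp eax, -1 ; 110a6f jne L
      110a71 pop rbx ; 110a72 ret

  THE LOOP INVARIANT at `L` (= `Vorbis.L.flush_packet.loop1`), `u` the entry state, `s` the state at the head, `f = u.rdi`: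
      rip = L · rbx = f · rsp = u.rsp − 8 · the code span is as in `u₀`                       (the walker's `w_rip w_rbx w_rsp w_eq`)
      hsame : Mem.SameExcept [⟨u.rsp − 272, u.rsp⟩, the six windows of `Reader.winsRaw f` AS A LITERAL LIST] u.mem s.mem
      hun   : ShadowUntouched u.mem s.mem
      hs1   : the saved rbx at [u.rsp − 8] · hs0 : the return address at [u.rsp]
      hdf   : DF = 0 · hmx : the MXCSR masks
      hrp   : ReaderPost Blk len u.mem s.mem f          (= `Bits Blk len s.mem f` ∧ `mu s.mem f ≤ mu u.mem f`)
      hbs   : valid_bits, acc of `s.mem` = those of `u.mem`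
      w_kept: RegsKept [rbx rsp rdi rax rcx rdx rsi r8–r11 r16–r31] u s                       (what the callee may clobber)
  NOT in it (memory-independent, taken from the precondition at every round): `ReaderEnv` (`ReaderPre.again`), the shadow layer
  at the loop's stack pointer (`ShadowPre.call` from `hpre.shadow` and `hun`). MEASURE: `fun v => mu v.mem f`; no ghost variable.
-/
import Asan.CheckWalk
import Vorbis.Spec.Units.flush_packet

open X86 X86.User Asan Vorbis

set_option maxRecDepth 4000
set_option maxHeartbeats 4000000

namespace Vorbis.Spec.Worked.flush_packet
open Vorbis.Spec.flush_packet (Statement)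

/-- A callee with the SAME data windows and a stack window nested in the caller's: the caller's footprint still holds. -/
theorem sameExcept_callee_w {ws : List Span} {lo hi lo' hi' : Nat} {m1 m2 m3 : Mem}
    (h : Mem.SameExcept (⟨lo, hi⟩ :: ws) m1 m2) (hs : Mem.SameExcept (⟨lo', hi'⟩ :: ws) m2 m3)
    (h1 : lo ≤ lo') (h2 : hi' ≤ hi) : Mem.SameExcept (⟨lo, hi⟩ :: ws) m1 m3 := by
  apply h.step_same hs
  intro w hw a ha1 ha2
  rcases List.mem_cons.mp hw with rfl | hw'
  · refine ⟨⟨lo, hi⟩, List.mem_cons_self, ?_, ?_⟩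
    · show lo ≤ a
      have : lo' ≤ a := ha1
      omega
    · show a < hi
      have : a < hi' := ha2
      omega
  · exact ⟨w, List.mem_cons_of_mem _ hw', ha1, ha2⟩

end Vorbis.Spec.Worked.flush_packet

/-- `flush_packet(f)` satisfies its contract: a loop on the measure μ around one call of `get8_packet_raw`. -/
theorem Vorbis.Spec.Worked.flush_packet_ok : Vorbis.Spec.flush_packet.Statement := by
  intro Lay hLay μ hμ u₀ hcode h_raw others frames Blk len u ret he hpre
  v_entry he
  -- the callee's contract, instantiated (the walker finds only hypotheses whose type is literally `Calls …`)
  have hraw := h_raw others frames Blk len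
  have hsp := hpre.shadow.rsp
  have hwhere := hpre.where_obj
  u_walk hcode [hμ.vendor] until [Vorbis.L.flush_packet.loop1] span [Vorbis.L.textLo, Vorbis.L.textHi] side (v_side)
  -- 110a64, the loop head (stb_vorbis_fixed.c:1621): the exact memory is replaced by what stays true
  have hsame : Mem.SameExcept (⟨(u.reg .rsp).toNat - 272, (u.reg .rsp).toNat⟩ :: Vorbis.Spec.Reader.winsRaw (u.reg .rdi).toNat)
      u.mem s_110a61.mem := by
    simp only [Vorbis.Spec.Reader.winsRaw]
    u_same
  simp only [Vorbis.Spec.Reader.winsRaw] at hsame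
  have hun : ShadowUntouched u.mem s_110a61.mem := by v_untouched
  have hs1 : UInt64.ofNat (s_110a61.mem.readLE (u.reg .rsp - 8) 8) = u.reg .rbx := by u_resolve
  have hs0 : UInt64.ofNat (s_110a61.mem.readLE (u.reg .rsp) 8) = ret := by u_resolve
  have hdf : s_110a61.flags .df = false := by
    rw [w_flags]
    exact he_df
  have hmx : s_110a61.mxcsr &&& 8064 = 8064 := by
    rw [w_mxcsr]
    exact he_mx
  have hkeep := Vorbis.Spec.Reader.store_off_obj hpre.bits (u.reg .rsp - 8) 8 (u.reg .rbx).toNat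
    (by u_omega) (by u_omega)
  rw [← w_mem] at hkeep
  obtain ⟨hrp, hbs⟩ := hkeep
  replace w_kept := w_kept.mono_all (S' := [.rbx, .rsp, .rdi, .rax, .rcx, .rdx, .rsi, .r8, .r9, .r10, .r11,
    .r16, .r17, .r18, .r19, .r20, .r21, .r22, .r23, .r24, .r25, .r26, .r27, .r28, .r29, .r30, .r31]) (by rfl)
  clear w_mem w_flags w_mxcsr
  u_loop (fun v => Vorbis.mu v.mem (u.reg .rdi).toNat)
  -- the body: `mov rdi, rbx ; call get8_packet_raw` (110a67), stopped at the returned state (110a6c)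
  u_walk hcode [hμ.vendor] until [Vorbis.L.flush_packet.loop1] span [Vorbis.L.textLo, Vorbis.L.textHi] side (v_side)
  case call_inv =>
    -- DF and the MXCSR masks at the callee's entry: the loop invariant's `hdf`, `hmx` (`mov` writes no flag)
    v_inv
  case pre_110a67 =>
    -- the callee's precondition: the shadow clause from the function's own, `Bits` over the push of the return address
    have hun' : ShadowUntouched u.mem s_110a67.mem := by v_untouched
    have hsh' : ShadowPre others frames s_110a67 :=
      hpre.shadow.call hun' (by u_omega) (by u_omega) (by u_omega)
    have hkeep := Vorbis.Spec.Reader.store_off_obj hrp.bits (u.reg .rsp - 16) 8 1116780 (by u_omega) (by u_omega)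
    rw [← w_mem] at hkeep
    exact hpre.again hsh' w_rdi hkeep.1.bits
  -- 110a6c, the state the callee returned: its postcondition and footprint with the entry state's registers resolved
  have hp := w_post
  have c_rdi := w_rdi_110a67
  have c_rsp := w_rsp_110a67
  have w_eq := Vorbis.conv_code_eqOn w_code
  simp only [X86.User.Spec.footprint, vspec, c_rsp, c_rdi] at w_same
  have hpost : Vorbis.Spec.PacketRawPost Blk len (u.reg .rdi).toNat s_110a67 s_110a67r := by
    rw [← c_rdi]
    exact hp
  have hkeep := Vorbis.Spec.Reader.store_off_obj hrp.bits (u.reg .rsp - 16) 8 1116780 (by u_omega) (by u_omega)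
  rw [← w_mem_110a67] at hkeep
  rw [w_mem_110a67] at w_same
  -- the invariant's clauses at the returned state
  have hs1r : UInt64.ofNat (s_110a67r.mem.readLE (u.reg .rsp - 8) 8) = u.reg .rbx := by u_frame hs1
  have hs0r : UInt64.ofNat (s_110a67r.mem.readLE (u.reg .rsp) 8) = ret := by u_frame hs0
  have hunr : ShadowUntouched u.mem s_110a67r.mem := by v_untouched
  have hdfr : s_110a67r.flags .df = false := (show X86.User.abiInv _ from w_inv).1
  have hmxr : s_110a67r.mxcsr &&& 8064 = 8064 := (show X86.User.abiInv _ from w_inv).2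
  have hrpr : ReaderPost Blk len u.mem s_110a67r.mem (u.reg .rdi).toNat := (hrp.trans hkeep.1).trans hpost.reader
  have hbsr : stb_vorbis.valid_bits s_110a67r.mem (u.reg .rdi).toNat = stb_vorbis.valid_bits u.mem (u.reg .rdi).toNat ∧
      stb_vorbis.acc s_110a67r.mem (u.reg .rdi).toNat = stb_vorbis.acc u.mem (u.reg .rdi).toNat := by
    rw [hpost.bitsSame.1, hpost.bitsSame.2, hkeep.2.1, hkeep.2.2]
    exact hbs
  have hmur : mu s_110a67.mem (u.reg .rdi).toNat ≤ mu s_110a61.mem (u.reg .rdi).toNat := hkeep.1.mu_le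
  have hpush : Mem.SameExcept _ u.mem (s_110a61.mem.writeLE (u.reg .rsp - 16) 8 1116780) :=
    Mem.SameExcept.step_writeLE' (u.reg .rsp - 16) 8 1116780 hsame (by u_omega) (by u_same_side)
  have hsamer := Vorbis.Spec.Worked.flush_packet.sameExcept_callee_w hpush w_same (by u_omega) (by u_omega)
  clear w_same hkeep hpush
  -- `cmp eax, -1 ; jne L`: both arms
  u_walk hcode [hμ.vendor] until [Vorbis.L.flush_packet.loop1] span [Vorbis.L.textLo, Vorbis.L.textHi] side (v_side)
  · -- the back edge (`jne` taken): a byte was returned, μ is strictly smaller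
    have hne : s_110a67r.reg .rax ≠ Vorbis.Spec.EOP := by
      intro h
      rw [h, Asan.part32_toNat] at hbr_110a6f
      exact hbr_110a6f (by decide)
    have hlt := hpost.strict hne
    u_loop_back
    · -- the direction flag: `cmp` writes status flags only
      rw [w_flags]
      simp only [X86.User.df_setStatus]
      exact hdfr
    · rw [w_mxcsr]
      exact hmxr
    · rw [w_mem]
      exact hbsr.1
    · rw [w_mem]
      exact hbsr.2
    · -- the measure
      rw [w_mem]
      omega
  · -- the exit: EOP was returned; `pop rbx ; ret`
    have heop : s_110a67r.reg .rax = Vorbis.Spec.EOP := by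
      rcases hpost.result with h | h
      · exact h
      · exfalso
        rw [Asan.part32_toNat] at hbr_110a6f
        simp only [Width.bits] at hbr_110a6f
        omega
    refine ReachVia.done (Or.inl ?_)
    v_returned
    -- the postcondition
    show Vorbis.Spec.FlushPost Blk len (u.reg .rdi).toNat u s_110a72
    rw [← w_mem] at hunr hrpr hbsr
    refine ⟨hunr, hrpr, ?_, hbsr⟩
    rw [w_mem]
    exact hpost.eop heop
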